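-- pv_equiv track=rewrite | github.com/doantrantuandat/Pattern-recognition | Tim_bien_DoanTranTuanDat.py | gx
-- ===== SOURCE A (Python) =====
-- class_a = [1,2,3,3,4,4,6,6,8]
--
-- class_b = [4,6,7,7,8,9,9,10,12]
--
-- def gx(xt):
--     loia = 0
--     loib = 0
--     for i in class_a:
--         if i > xt:
--             loia = loia + 1
--     for i in class_b:
--         if i <= xt:
--             loib = loib + 1
--     return loia, loib
-- ===== SOURCE B (Python) =====
-- import bisect
--
-- class_a = [1,2,3,3,4,4,6,6,8]
--
-- class_b = [4,6,7,7,8,9,9,10,12]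
--
-- def gx(xt):
--     loia = len(class_a) - bisect.bisect_right(class_a, xt)
--     loib = bisect.bisect_right(class_b, xt)
--     return loia, loib
-- ===== Notes on version B (the rewrite author's own statement) =====
-- stated objective: idiomatic
-- what changed: Replaces the two counting loops with bisect.bisect_right binary searches over the already-sorted module lists.
import Mathlib
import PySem

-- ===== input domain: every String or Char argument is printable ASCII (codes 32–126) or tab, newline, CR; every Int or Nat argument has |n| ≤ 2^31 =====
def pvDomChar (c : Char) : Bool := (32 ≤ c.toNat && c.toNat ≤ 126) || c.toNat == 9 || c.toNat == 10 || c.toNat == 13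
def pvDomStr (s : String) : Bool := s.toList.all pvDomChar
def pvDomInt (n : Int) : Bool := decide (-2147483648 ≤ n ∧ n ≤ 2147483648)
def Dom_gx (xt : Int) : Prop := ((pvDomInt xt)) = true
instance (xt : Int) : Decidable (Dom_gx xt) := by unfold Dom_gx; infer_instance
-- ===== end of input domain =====

-- B replaces the two linear counting loops with bisect_right binary searches over the sorted module lists; equivalence of the return value is proved for all xt.

-- ===== PORT A =====
def classA : List Int := [1,2,3,3,4,4,6,6,8]
def classB : List Int := [4,6,7,7,8,9,9,10,12]

def gx (xt : Int) : Int × Int :=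
  let loia := classA.foldl (fun acc i => if i > xt then acc + 1 else acc) 0
  let loib := classB.foldl (fun acc i => if i ≤ xt then acc + 1 else acc) 0
  (loia, loib)

-- ===== PORT B =====
-- bisect.bisect_right is a standard-library call; on a sorted list it returns the
-- number of elements ≤ x, ported here as that corresponding count.
def bisectRight (l : List Int) (x : Int) : Int :=
  (l.countP (fun a => decide (a ≤ x)) : Nat)

def gx_alt (xt : Int) : Int × Int :=
  (((classA.length : Nat) : Int) - bisectRight classA xt, bisectRight classB xt)

-- ===== PRECONDITION & SPEC =====
def Spec_gx (xt : Int) (out : Int × Int) : Prop := out = gx_alt xt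
instance (xt : Int) (out : Int × Int) : Decidable (Spec_gx xt out) := by unfold Spec_gx; infer_instance

-- ===== CLAIM (what is proved, stated in full; the proofs are below) =====
def Claim_equal_gx : Prop := ∀ (xt : Int), Dom_gx xt → Spec_gx xt (gx xt)

-- ===== LEMMAS AND PROOFS =====

theorem foldl_count_eq_countP (p : Int → Prop) [DecidablePred p] (l : List Int) (acc : Int) :
    l.foldl (fun acc i => if p i then acc + 1 else acc) acc
      = acc + ((l.countP fun a => decide (p a) : Nat) : Int) := by
  induction l generalizing acc with
  | nil => simp
  | cons x xs ih =>
    by_cases h : p x <;> simp [List.foldl, h, ih] <;> push_cast <;> ring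

theorem countP_not_eq (p : Int → Bool) (l : List Int) :
    (l.countP fun a => !p a) = l.length - l.countP p := by
  induction l with
  | nil => simp
  | cons x xs ih =>
    have hle := List.countP_le_length (p := p) (l := xs)
    by_cases h : p x <;> simp [h, ih] <;> omega

theorem countP_le (p : Int → Bool) (l : List Int) : l.countP p ≤ l.length :=
  List.countP_le_length

-- ===== VERDICT (by name: the statement is the Claim_ definition above) =====
theorem gx_spec : Claim_equal_gx := by
  intro xt _
  show gx xt = gx_alt xt
  simp only [gx, gx_alt, bisectRight]
  refine Prod.ext ?_ ?_
  · show classA.foldl (fun acc i => if i > xt then acc + 1 else acc) 0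
      = ((classA.length : Nat) : Int) - ((classA.countP fun a => decide (a ≤ xt) : Nat) : Int)
    rw [foldl_count_eq_countP (fun i => i > xt)]
    have h1 : classA.countP (fun i => decide (i > xt))
        = classA.countP fun a => !decide (a ≤ xt) := by
      apply List.countP_congr; intro a _; simp [not_le]
    rw [h1, countP_not_eq]
    have := countP_le (fun a => decide (a ≤ xt)) classA
    omega
  · show classB.foldl (fun acc i => if i ≤ xt then acc + 1 else acc) 0
      = ((classB.countP fun a => decide (a ≤ xt) : Nat) : Int)
    rw [foldl_count_eq_countP (fun i => i ≤ xt)]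
    simp
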